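-- pv_equiv track=rewrite | github.com/Manpreet-2002/finance_research_agent | backend/app/sheets/google_engine.py | _matrix_shape_summary
-- ===== SOURCE A (Python) =====
-- def _matrix_shape_summary(matrix: list[list[object]]) -> str:
--     row_count = len(matrix)
--     if row_count == 0:
--         return "0x0"
--     widths = sorted({len(row) if isinstance(row, list) else 1 for row in matrix})
--     if len(widths) == 1:
--         return f"{row_count}x{widths[0]}"
--     return f"{row_count}x{max(widths)}(ragged)"
-- ===== SOURCE B (Python) =====
-- def _matrix_shape_summary(matrix: list[list[object]]) -> str:
--     row_count = len(matrix)
--     if row_count == 0: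
--         return "0x0"
--     first = matrix[0]
--     min_w = max_w = len(first) if isinstance(first, list) else 1
--     for row in matrix[1:]:
--         w = len(row) if isinstance(row, list) else 1
--         if w < min_w:
--             min_w = w
--         if w > max_w:
--             max_w = w
--     if min_w == max_w:
--         return f"{row_count}x{min_w}"
--     return f"{row_count}x{max_w}(ragged)"
-- ===== Notes on version B (the rewrite author's own statement) =====
-- stated objective: simpler
-- what changed: Replaces the set-comprehension + sorted + max with a single pass that maintains the running min and max row width; no set is built and no sort occurs.
import Mathlib
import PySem

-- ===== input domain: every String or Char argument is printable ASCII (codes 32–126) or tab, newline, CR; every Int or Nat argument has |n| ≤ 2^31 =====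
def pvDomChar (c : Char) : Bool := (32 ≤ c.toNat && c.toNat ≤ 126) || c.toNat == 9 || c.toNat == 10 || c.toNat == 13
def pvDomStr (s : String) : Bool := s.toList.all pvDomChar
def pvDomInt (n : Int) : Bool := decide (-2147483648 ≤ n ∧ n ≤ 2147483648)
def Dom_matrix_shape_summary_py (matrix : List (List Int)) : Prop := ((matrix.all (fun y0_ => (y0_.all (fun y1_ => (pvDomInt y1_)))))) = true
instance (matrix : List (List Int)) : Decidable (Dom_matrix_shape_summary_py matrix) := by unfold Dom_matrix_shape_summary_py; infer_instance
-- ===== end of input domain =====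

-- B replaces A's build-a-set-then-sort with one pass keeping the running min/max width (objective: simpler).

-- ===== PORT A =====
-- literal port of A: collect the distinct row widths into a set, sort them,
-- answer by whether there is exactly one width (a row of List Int is always a list, so its width is its length)
def matrix_shape_summary_py (matrix : List (List Int)) : String :=
  let row_count := matrix.length
  if row_count = 0 then "0x0"
  else
    let widths := PySem.List.sorted (PySem.Set.ofList (matrix.map (fun row => (row.length : Int)))) (fun x => x) false
    if widths.length = 1 then
      PySem.Int.toStr (row_count : Int) ++ "x" ++ PySem.Int.toStr (PySem.List.pyGetD widths 0 0)
    else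
      PySem.Int.toStr (row_count : Int) ++ "x" ++ PySem.Int.toStr ((PySem.List.max? widths (fun x => x)).getD 0) ++ "(ragged)"

-- ===== PORT B =====
-- literal port of B: one fold over the tail maintaining (min_w, max_w)
def matrix_shape_summary_py_alt (matrix : List (List Int)) : String :=
  match matrix with
  | [] => "0x0"
  | first :: rest =>
    let w0 : Int := first.length
    let mm := rest.foldl (fun (p : Int × Int) row =>
        let w : Int := row.length
        (if w < p.1 then w else p.1, if w > p.2 then w else p.2)) (w0, w0)
    let rc : Int := ((rest.length + 1 : Nat) : Int)
    if mm.1 = mm.2 then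
      PySem.Int.toStr rc ++ "x" ++ PySem.Int.toStr mm.1
    else
      PySem.Int.toStr rc ++ "x" ++ PySem.Int.toStr mm.2 ++ "(ragged)"

-- ===== PRECONDITION & SPEC =====
def Spec_matrix_shape_summary_py (matrix : List (List Int)) (out : String) : Prop := out = matrix_shape_summary_py_alt matrix
instance (matrix : List (List Int)) (out : String) : Decidable (Spec_matrix_shape_summary_py matrix out) := by unfold Spec_matrix_shape_summary_py; infer_instance

-- ===== CLAIM (what is proved, stated in full; the proofs are below) =====
def Claim_equal_matrix_shape_summary_py : Prop := ∀ (matrix : List (List Int)), Dom_matrix_shape_summary_py matrix → Spec_matrix_shape_summary_py matrix (matrix_shape_summary_py matrix)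

-- ===== LEMMAS AND PROOFS =====

-- B's fold computes (foldl min, foldl max) over the row widths
theorem pv_fold_minmax (rest : List (List Int)) (a b : Int) :
    rest.foldl (fun (p : Int × Int) row =>
        let w : Int := row.length
        (if w < p.1 then w else p.1, if w > p.2 then w else p.2)) (a, b)
    = ((rest.map (fun row => (row.length : Int))).foldl min a,
       (rest.map (fun row => (row.length : Int))).foldl max b) := by
  induction rest generalizing a b with
  | nil => rfl
  | cons r t ih =>
      simp only [List.foldl_cons, List.map_cons]
      rw [ih]
      have h1 : (if ((r.length : Int)) < a then ((r.length : Int)) else a) = min a r.length := by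
        rw [min_def]; split_ifs <;> omega
      have h2 : (if ((r.length : Int)) > b then ((r.length : Int)) else b) = max b r.length := by
        rw [max_def]; split_ifs <;> omega
      rw [h1, h2]

theorem pv_foldl_min_le_init (l : List Int) (a : Int) : l.foldl min a ≤ a := by
  induction l generalizing a with
  | nil => simp
  | cons x t ih => exact le_trans (ih _) (min_le_left _ _)

theorem pv_foldl_min_le_mem (l : List Int) (a x : Int) (hx : x ∈ l) : l.foldl min a ≤ x := by
  induction l generalizing a with
  | nil => simp at hx
  | cons y t ih =>
      rcases List.mem_cons.1 hx with h | h
      · subst h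
        simp only [List.foldl_cons]
        exact le_trans (pv_foldl_min_le_init _ _) (min_le_right _ _)
      · exact ih _ h

theorem pv_foldl_min_mem (l : List Int) (a : Int) : l.foldl min a ∈ a :: l := by
  induction l generalizing a with
  | nil => simp
  | cons x t ih =>
      have := ih (min a x)
      simp only [List.foldl_cons]
      rcases List.mem_cons.1 this with h | h
      · rw [h, min_def]
        split <;> simp
      · exact List.mem_cons.2 (Or.inr (List.mem_cons.2 (Or.inr h)))

theorem pv_foldl_max_init_le (l : List Int) (a : Int) : a ≤ l.foldl max a := by
  induction l generalizing a with
  | nil => simp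
  | cons x t ih => exact le_trans (le_max_left _ _) (ih _)

theorem pv_foldl_max_mem_le (l : List Int) (a x : Int) (hx : x ∈ l) : x ≤ l.foldl max a := by
  induction l generalizing a with
  | nil => simp at hx
  | cons y t ih =>
      rcases List.mem_cons.1 hx with h | h
      · subst h
        simp only [List.foldl_cons]
        exact le_trans (le_max_right _ _) (pv_foldl_max_init_le _ _)
      · exact ih _ h

theorem pv_foldl_max_mem (l : List Int) (a : Int) : l.foldl max a ∈ a :: l := by
  induction l generalizing a with
  | nil => simp
  | cons x t ih =>
      have := ih (max a x)
      simp only [List.foldl_cons]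
      rcases List.mem_cons.1 this with h | h
      · rw [h, max_def]
        split <;> simp
      · exact List.mem_cons.2 (Or.inr (List.mem_cons.2 (Or.inr h)))

theorem pv_add_const (l : List Int) (c : Int) (h : ∀ x ∈ l, x = c) :
    l.foldl PySem.Set.add [c] = [c] := by
  induction l with
  | nil => rfl
  | cons x t ih =>
      have hx : x = c := h x (List.mem_cons_self ..)
      subst hx
      simp only [List.foldl_cons]
      have hadd : PySem.Set.add [x] x = [x] := by
        simp [PySem.Set.add, PySem.Set.contains]
      rw [hadd]
      exact ih (fun y hy => h y (List.mem_cons.2 (Or.inr hy)))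

-- a nonempty constant list has the singleton as its set
theorem pv_set_const (l : List Int) (c : Int) (h : ∀ x ∈ l, x = c) :
    PySem.Set.ofList (c :: l) = [c] := by
  rw [PySem.Set.ofList_eq_foldl]
  simp only [List.foldl_cons]
  have hadd : PySem.Set.add ([] : List Int) c = [c] := by
    simp [PySem.Set.add, PySem.Set.contains]
  rw [hadd]
  exact pv_add_const l c h

theorem matrix_shape_summary_py_spec : Claim_equal_matrix_shape_summary_py := by
  intro matrix _
  unfold Spec_matrix_shape_summary_py
  cases matrix with
  | nil => rfl
  | cons first rest =>
    simp only [matrix_shape_summary_py, matrix_shape_summary_py_alt, List.length_cons,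
      List.map_cons, Nat.succ_ne_zero, if_false, pv_fold_minmax]
    set w0 : Int := (first.length : Int) with hw0
    set ws' : List Int := rest.map (fun row => (row.length : Int)) with hws
    set m : Int := ws'.foldl min w0 with hm
    set M : Int := ws'.foldl max w0 with hM
    have hub : ∀ x ∈ w0 :: ws', x ≤ M := by
      intro x hx
      rcases List.mem_cons.1 hx with h | h
      · exact h ▸ pv_foldl_max_init_le _ _
      · exact pv_foldl_max_mem_le _ _ _ h
    have hlb : ∀ x ∈ w0 :: ws', m ≤ x := by
      intro x hx
      rcases List.mem_cons.1 hx with h | h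
      · exact h ▸ pv_foldl_min_le_init _ _
      · exact pv_foldl_min_le_mem _ _ _ h
    by_cases hmM : m = M
    · -- all widths equal: the set is a singleton
      have hall : ∀ x ∈ ws', x = m := fun x hx =>
        le_antisymm (hmM ▸ hub x (List.mem_cons.2 (Or.inr hx))) (hlb x (List.mem_cons.2 (Or.inr hx)))
      have hw0m : w0 = m :=
        le_antisymm (hmM ▸ hub w0 (List.mem_cons_self ..)) (hlb w0 (List.mem_cons_self ..))
      have hset : PySem.Set.ofList (w0 :: ws') = [m] := by
        rw [hw0m]; exact pv_set_const ws' m hall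
      have hsorted : PySem.List.sorted (PySem.Set.ofList (w0 :: ws')) (fun x => x) false = [m] := by
        rw [hset]; rfl
      rw [hsorted, if_pos hmM]
      simp [PySem.List.pyGetD, PySem.List.pyGet?, PySem.List.pyIdx?, hmM]
    · -- ragged: the set has at least two widths
      have hmem : ∀ x, x ∈ PySem.List.sorted (PySem.Set.ofList (w0 :: ws')) (fun x => x) false ↔ x ∈ w0 :: ws' := by
        intro x
        rw [PySem.List.mem_sorted, PySem.Set.mem_ofList]
      have hmmem : m ∈ w0 :: ws' := pv_foldl_min_mem _ _
      have hMmem : M ∈ w0 :: ws' := pv_foldl_max_mem _ _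
      have hlen : (PySem.List.sorted (PySem.Set.ofList (w0 :: ws')) (fun x => x) false).length ≠ 1 := by
        intro hl
        obtain ⟨c, hc⟩ := List.length_eq_one_iff.1 hl
        have h1 : m = c := by have := (hmem m).2 hmmem; rw [hc] at this; simpa using this
        have h2 : M = c := by have := (hmem M).2 hMmem; rw [hc] at this; simpa using this
        exact hmM (h1.trans h2.symm)
      rw [if_neg hlen, if_neg hmM]
      have hne : PySem.List.sorted (PySem.Set.ofList (w0 :: ws')) (fun x => x) false ≠ [] := by
        intro hnil
        have := (hmem w0).2 (List.mem_cons_self ..)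
        rw [hnil] at this
        simp at this
      obtain ⟨z, hz⟩ : ∃ z, PySem.List.max? (PySem.List.sorted (PySem.Set.ofList (w0 :: ws')) (fun x => x) false) (fun x => x) = some z := by
        cases hmx : PySem.List.max? (PySem.List.sorted (PySem.Set.ofList (w0 :: ws')) (fun x => x) false) (fun x => x) with
        | none => exact absurd ((PySem.List.max?_eq_none_iff _ _).1 hmx) hne
        | some z => exact ⟨z, rfl⟩
      have hzM : z = M := by
        have hz_mem : z ∈ w0 :: ws' := (hmem z).1 (PySem.List.max?_mem hz)
        have h1 : z ≤ M := hub z hz_mem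
        have h2 : M ≤ z := PySem.List.max?_isMax hz M ((hmem M).2 hMmem)
        exact le_antisymm h1 h2
      rw [hz, hzM]
      rfl
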